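-- pv_equiv track=rewrite | github.com/amshrestha2020/CodeSignal | CodeSignal/Core/SwitchLights.py | solution
-- ===== SOURCE A (Python) =====
-- def solution(a):
--     result = [0] * len(a)
--     switch = True
--
--     for i in range(len(a) - 1, -1, -1):
--
--         if a[i] == 1:
--             switch = not switch
--
--         if switch:
--             result[i] = a[i]
--         else:
--             result[i] = 1^a[i] # flip (or 1-a[i])
--
--     return result
-- ===== SOURCE B (Python) =====
-- def solution(a):
--     # forward two-phase: count ones once, then map using remaining-suffix parity
--     remaining = sum(1 for x in a if x == 1)
--     out = []
--     for x in a: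
--         out.append(x if remaining % 2 == 0 else 1 ^ x)
--         if x == 1:
--             remaining -= 1
--     return out
-- ===== Notes on version B (the rewrite author's own statement) =====
-- stated objective: alternative
-- what changed: Backward single-scan toggling a boolean switch is replaced by a two-phase forward pass: count the 1s once, then map each element by the parity of the remaining-suffix count.
import Mathlib
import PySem

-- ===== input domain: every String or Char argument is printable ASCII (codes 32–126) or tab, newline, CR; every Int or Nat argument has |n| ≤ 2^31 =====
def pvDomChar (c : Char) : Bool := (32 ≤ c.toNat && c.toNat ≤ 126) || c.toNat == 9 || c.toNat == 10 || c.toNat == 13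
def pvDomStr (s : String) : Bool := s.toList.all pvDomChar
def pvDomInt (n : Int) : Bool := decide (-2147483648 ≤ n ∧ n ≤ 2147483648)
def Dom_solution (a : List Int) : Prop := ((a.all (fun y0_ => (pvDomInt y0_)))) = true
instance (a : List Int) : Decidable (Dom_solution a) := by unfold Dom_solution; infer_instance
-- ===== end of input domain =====

-- B changes decomposition only (count-then-map forward instead of a backward toggle scan); equal return values proved below.

-- ===== PORT A =====
-- A scans from the right carrying the boolean `switch`; this recursion processes the
-- tail first (the elements to the right), exactly A's reversed loop over indices.
def solutionGo (xs : List Int) : Bool × List Int :=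
  match xs with
  | [] => (true, [])
  | x :: rest =>
    let (sw, r) := solutionGo rest
    let sw' := if x == 1 then !sw else sw
    (sw', (if sw' then x else Int.xor 1 x) :: r)

def solution (a : List Int) : List Int := (solutionGo a).2

-- ===== PORT B =====
-- first phase of Source B: sum(1 for x in a if x == 1)
def solutionAltCount (a : List Int) : Int :=
  a.foldl (fun acc x => if x == 1 then acc + 1 else acc) 0

-- second phase: forward map carrying `remaining`
def solutionAltGo (remaining : Int) (xs : List Int) : List Int :=
  match xs with
  | [] => []
  | x :: rest =>
    (if remaining % 2 == 0 then x else Int.xor 1 x) ::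
      solutionAltGo (if x == 1 then remaining - 1 else remaining) rest

def solution_alt (a : List Int) : List Int := solutionAltGo (solutionAltCount a) a

-- ===== PRECONDITION & SPEC =====
def Spec_solution (a : List Int) (out : List Int) : Prop := out = solution_alt a
instance (a : List Int) (out : List Int) : Decidable (Spec_solution a out) := by unfold Spec_solution; infer_instance

-- ===== CLAIM (what is proved, stated in full; the proofs are below) =====
def Claim_equal_solution : Prop := ∀ (a : List Int), Dom_solution a → Spec_solution a (solution a)

-- ===== LEMMAS AND PROOFS =====

-- the fold computing B's count, generalized over the accumulator
theorem solutionAltCount_foldl (xs : List Int) (c : Int) :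
    xs.foldl (fun acc x => if x == 1 then acc + 1 else acc) c
      = c + solutionAltCount xs := by
  induction xs generalizing c with
  | nil => simp [solutionAltCount]
  | cons x rest ih =>
    simp only [solutionAltCount, List.foldl_cons]
    rw [ih, ih (if x == 1 then (0:Int) + 1 else 0)]
    split <;> ring

-- count of a cons, in closed form
theorem solutionAltCount_cons (x : Int) (rest : List Int) :
    solutionAltCount (x :: rest)
      = (if x = 1 then 1 else 0) + solutionAltCount rest := by
  simp only [solutionAltCount, List.foldl_cons]
  rw [solutionAltCount_foldl]
  by_cases hx : x = 1 <;> simp [hx, solutionAltCount]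

-- A's switch after processing xs equals "count of 1s in xs is even"
theorem solutionGo_fst (xs : List Int) :
    (solutionGo xs).1 = (solutionAltCount xs % 2 == 0) := by
  induction xs with
  | nil => simp [solutionGo, solutionAltCount]
  | cons x rest ih =>
    simp only [solutionGo]
    rw [solutionAltCount_cons, ih]
    by_cases hx : x = 1
    · rcases Int.emod_two_eq (solutionAltCount rest) with h | h <;>
        simp [hx, h] <;> omega
    · simp [hx]

theorem solutionGo_snd (xs : List Int) :
    (solutionGo xs).2 = solutionAltGo (solutionAltCount xs) xs := by
  induction xs with
  | nil => simp [solutionGo, solutionAltGo]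
  | cons x rest ih =>
    simp only [solutionGo, solutionAltGo]
    rw [solutionAltCount_cons, solutionGo_fst, ih]
    by_cases hx : x = 1
    · have hb : ((1 + solutionAltCount rest) % 2 == 0)
          = !(solutionAltCount rest % 2 == 0) := by
        rcases Int.emod_two_eq (solutionAltCount rest) with h | h <;>
          simp [h] <;> omega
      simp [hx, hb]
    · simp [hx]

-- ===== VERDICT (by name: the statement is the Claim_ definition above) =====
theorem solution_spec : Claim_equal_solution := by
  intro a _
  unfold Spec_solution solution solution_alt
  exact solutionGo_snd a
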